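-- pv_equiv track=rewrite | github.com/southpawgeek/perlweeklychallenge-club | challenge-076/paulo-custodio/python/ch-2.py | grid_words
-- ===== SOURCE A (Python) =====
-- def grid_words(min_len, grid):
--     words = set()
--     for r0 in range(0, len(grid)):
--         for c0 in range(0, len(grid[0])):
--             for dr in range(-1, 2):
--                 for dc in range(-1, 2):
--                     if dr!=0 or dc!=0:
--                         word = ""
--                         l = 0
--                         while True:
--                             r, c = r0+l*dr, c0+l*dc
--                             if r<0 or r>=len(grid) or \
--                                c<0 or c>=len(grid[0]):
--                                 break
--                             word += grid[r][c]
--                             if len(word)>=min_len: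
--                                 words.add(word.lower())
--                             l += 1
--     return words
-- ===== SOURCE B (Python) =====
-- # B: same word set, but the per-cell rays are built directly from their closed-form
-- # length (no step-by-step bounds checks) over a once-lowercased grid, then all
-- # qualifying prefixes of each ray are added by slicing.
-- def grid_words(min_len, grid):
--     words = set()
--     R = len(grid)
--     if R == 0:
--         return words
--     C = len(grid[0])
--     low = [row[:C].lower() for row in grid]
--     thr = max(min_len, 1)
--     for r0 in range(R):
--         for c0 in range(C):
--             for dr, dc in ((-1, -1), (-1, 0), (-1, 1), (0, -1),
--                            (0, 1), (1, -1), (1, 0), (1, 1)):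
--                 n = R - r0 if dr > 0 else (r0 + 1 if dr < 0 else C)
--                 m = C - c0 if dc > 0 else (c0 + 1 if dc < 0 else R)
--                 L = min(n, m)
--                 if L < thr:
--                     continue
--                 ray = ''.join(low[r0 + l * dr][c0 + l * dc] for l in range(L))
--                 for k in range(thr, L + 1):
--                     words.add(ray[:k])
--     return words
-- ===== Notes on version B (the rewrite author's own statement) =====
-- stated objective: alternative
-- what changed: B replaces A's per-direction while-loop (per-step bounds checks, word built char-by-char, a full lowercase on every add) by computing each ray's length in closed form from the grid geometry, building the ray once over a once-lowercased width-clipped grid, and adding every qualifying prefix by slicing; grids with a row shorter than row 0, on which A raises IndexError, are excluded by Pre_.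
import Mathlib
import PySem

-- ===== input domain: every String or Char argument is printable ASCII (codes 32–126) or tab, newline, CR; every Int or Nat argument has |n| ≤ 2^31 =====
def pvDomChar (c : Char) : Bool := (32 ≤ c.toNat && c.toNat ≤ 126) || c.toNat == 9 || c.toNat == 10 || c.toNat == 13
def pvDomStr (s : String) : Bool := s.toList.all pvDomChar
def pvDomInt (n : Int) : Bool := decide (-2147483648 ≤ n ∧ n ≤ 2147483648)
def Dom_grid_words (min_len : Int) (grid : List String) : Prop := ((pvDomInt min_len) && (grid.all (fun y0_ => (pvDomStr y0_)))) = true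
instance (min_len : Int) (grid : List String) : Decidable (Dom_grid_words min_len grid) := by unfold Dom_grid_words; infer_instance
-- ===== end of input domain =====

-- B replaces A's step-by-step bounds-checked walks by rays of closed-form length over a
-- once-lowercased grid, adding each qualifying prefix by slicing (objective: alternative).

-- ===== PORT A =====
-- grid[r][c] (both indices known in range when used)
def gwChar (grid : List String) (r c : Int) : Char :=
  PySem.List.pyGetD (PySem.List.pyGetD grid r "").toList c '?'

-- the 'while True' loop of A; fuel bounds the iteration count (the loop itself breaks first)
def gwWalk (min_len : Int) (grid : List String) (r0 c0 dr dc : Int) :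
    Nat → Int → List Char → PySem.Set String → PySem.Set String
  | 0, _, _, words => words
  | fuel+1, l, word, words =>
      let r := r0 + l*dr
      let c := c0 + l*dc
      if r < 0 ∨ (grid.length : Int) ≤ r ∨ c < 0 ∨ ((PySem.List.pyGetD grid 0 "").toList.length : Int) ≤ c then
        words
      else
        let word' := word ++ [gwChar grid r c]
        let words' := if min_len ≤ (word'.length : Int) then
            PySem.Set.add words (String.ofList (PySem.Chars.lower word'))
          else words
        gwWalk min_len grid r0 c0 dr dc fuel (l+1) word' words'

def grid_words (min_len : Int) (grid : List String) : List String :=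
  (PySem.List.pyRange 0 (grid.length : Int) 1).foldl (fun words r0 =>
    (PySem.List.pyRange 0 ((PySem.List.pyGetD grid 0 "").toList.length : Int) 1).foldl (fun words c0 =>
      (PySem.List.pyRange (-1) 2 1).foldl (fun words dr =>
        (PySem.List.pyRange (-1) 2 1).foldl (fun words dc =>
          if dr ≠ 0 ∨ dc ≠ 0 then
            gwWalk min_len grid r0 c0 dr dc
              (grid.length + (PySem.List.pyGetD grid 0 "").toList.length + 1) 0 [] words
          else words) words) words) words) PySem.Set.empty

-- ===== PORT B =====
-- low = [row[:C].lower() for row in grid]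
def gwaLow (grid : List String) (C : Int) : List (List Char) :=
  grid.map (fun row => PySem.Chars.lower (PySem.List.slice row.toList none (some C)))

-- ''.join(low[r0+l*dr][c0+l*dc] for l in range(L))
def gwaRay (low : List (List Char)) (r0 c0 dr dc L : Int) : List Char :=
  (PySem.List.pyRange 0 L 1).map (fun l =>
    PySem.List.pyGetD (PySem.List.pyGetD low (r0 + l*dr) []) (c0 + l*dc) '?')

def gwaDirs : List (Int × Int) :=
  [(-1,-1), (-1,0), (-1,1), (0,-1), (0,1), (1,-1), (1,0), (1,1)]

def grid_words_alt (min_len : Int) (grid : List String) : List String :=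
  let R : Int := (grid.length : Int)
  if R = 0 then PySem.Set.empty else
  let C : Int := ((PySem.List.pyGetD grid 0 "").toList.length : Int)
  let low := gwaLow grid C
  let thr := max min_len 1
  (PySem.List.pyRange 0 R 1).foldl (fun words r0 =>
    (PySem.List.pyRange 0 C 1).foldl (fun words c0 =>
      gwaDirs.foldl (fun words dir =>
        let n := if 0 < dir.1 then R - r0 else if dir.1 < 0 then r0 + 1 else C
        let m := if 0 < dir.2 then C - c0 else if dir.2 < 0 then c0 + 1 else R
        let L := min n m
        if L < thr then words
        else
          let ray := gwaRay low r0 c0 dir.1 dir.2 L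
          (PySem.List.pyRange thr (L+1) 1).foldl (fun words k =>
            PySem.Set.add words (String.ofList (PySem.List.slice ray none (some k)))) words)
        words) words) PySem.Set.empty

-- ===== PRECONDITION & SPEC =====
-- A indexes every row at the columns 0..len(grid[0])-1 and raises IndexError on a row
-- shorter than row 0; Pre_ excludes exactly those grids (rows at least as long as row 0).
def Pre_grid_words (min_len : Int) (grid : List String) : Prop :=
  ∀ s ∈ grid, (PySem.List.pyGetD grid 0 "").toList.length ≤ s.toList.length
instance (min_len : Int) (grid : List String) : Decidable (Pre_grid_words min_len grid) := by
  unfold Pre_grid_words; infer_instance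

def pvWitness_grid_words : Int × List String := (2, ["ab", "cd"])

def Spec_grid_words (min_len : Int) (grid : List String) (out : List String) : Prop := out = grid_words_alt min_len grid
instance (min_len : Int) (grid : List String) (out : List String) : Decidable (Spec_grid_words min_len grid out) := by unfold Spec_grid_words; infer_instance

-- ===== CLAIM (what is proved, stated in full; the proofs are below) =====
def Claim_equal_grid_words : Prop := ∀ (min_len : Int) (grid : List String), Dom_grid_words min_len grid → Pre_grid_words min_len grid → Spec_grid_words min_len grid (grid_words min_len grid)

-- ===== LEMMAS AND PROOFS =====

-- abbreviations used only by the proofs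
abbrev gwR (grid : List String) : Int := (grid.length : Int)
abbrev gwC (grid : List String) : Int := ((PySem.List.pyGetD grid 0 "").toList.length : Int)

-- the closed-form ray length of B
def gwL (R C r0 c0 dr dc : Int) : Int :=
  min (if 0 < dr then R - r0 else if dr < 0 then r0 + 1 else C)
      (if 0 < dc then C - c0 else if dc < 0 then c0 + 1 else R)

-- the word A has accumulated after j loop iterations
def gwWord (grid : List String) (r0 c0 dr dc : Int) (j : Nat) : List Char :=
  (List.range j).map (fun (i : Nat) => gwChar grid (r0 + (i:Int)*dr) (c0 + (i:Int)*dc))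

lemma gw_bounds (grid : List String) (r0 c0 dr dc : Int)
    (hdr : dr = -1 ∨ dr = 0 ∨ dr = 1) (hdc : dc = -1 ∨ dc = 0 ∨ dc = 1)
    (hne : ¬(dr = 0 ∧ dc = 0))
    (hr : 0 ≤ r0 ∧ r0 < gwR grid) (hc : 0 ≤ c0 ∧ c0 < gwC grid) :
    (1 ≤ gwL (gwR grid) (gwC grid) r0 c0 dr dc ∧
     gwL (gwR grid) (gwC grid) r0 c0 dr dc ≤ gwR grid + gwC grid) ∧
    ∀ l : Int, 0 ≤ l →
      ((r0 + l*dr < 0 ∨ gwR grid ≤ r0 + l*dr ∨ c0 + l*dc < 0 ∨ gwC grid ≤ c0 + l*dc) ↔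
        gwL (gwR grid) (gwC grid) r0 c0 dr dc ≤ l) := by
  obtain ⟨hr0, hrR⟩ := hr
  obtain ⟨hc0, hcC⟩ := hc
  unfold gwR gwC at *
  rcases hdr with rfl|rfl|rfl <;> rcases hdc with rfl|rfl|rfl <;>
    first
      | exact absurd ⟨rfl, rfl⟩ hne
      | (simp only [gwL]
         refine ⟨⟨?_, ?_⟩, fun l hl => ?_⟩ <;> split_ifs <;> omega)

lemma gw_char_eq (grid : List String) (hpre : ∀ s ∈ grid, (PySem.List.pyGetD grid 0 "").toList.length ≤ s.toList.length)
    (r c : Int) (hr : 0 ≤ r ∧ r < gwR grid) (hc : 0 ≤ c ∧ c < gwC grid) :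
    PySem.List.pyGetD (PySem.List.pyGetD (gwaLow grid (gwC grid)) r []) c '?' =
      PySem.Chars.lowerChar (gwChar grid r c) := by
  obtain ⟨h0r, hrR⟩ := hr
  obtain ⟨h0c, hcC⟩ := hc
  unfold gwR at hrR
  unfold gwC at hcC ⊢
  have hrn : r.toNat < grid.length := by omega
  have hcn : c.toNat < (PySem.List.pyGetD grid 0 "").toList.length := by omega
  have hrow := hpre (grid[r.toNat]) (List.getElem_mem hrn)
  unfold gwaLow gwChar
  rw [PySem.List.pyGetD_eq_getElem _ _ h0r (by simpa using hrR),
      PySem.List.pyGetD_eq_getElem _ _ h0r (by simpa using hrR)]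
  simp only [List.getElem_map]
  rw [PySem.List.slice_to_natCast]
  have hlow : ∀ w : List Char, PySem.Chars.lower w = w.map PySem.Chars.lowerChar := fun _ => rfl
  rw [hlow]
  have hlen : ((grid[r.toNat].toList.take ((PySem.List.pyGetD grid 0 "").toList.length)).map PySem.Chars.lowerChar).length = (PySem.List.pyGetD grid 0 "").toList.length := by
    simp only [List.length_map, List.length_take]
    omega
  rw [PySem.List.pyGetD_eq_getElem _ _ h0c (by rw [hlen]; exact_mod_cast hcC),
      PySem.List.pyGetD_eq_getElem _ _ h0c (by exact_mod_cast (by omega : c < (grid[r.toNat].toList.length : Int)))]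
  simp [List.getElem_take]

lemma gw_word_lower_eq (grid : List String) (hpre : ∀ s ∈ grid, (PySem.List.pyGetD grid 0 "").toList.length ≤ s.toList.length)
    (r0 c0 dr dc : Int)
    (hdr : dr = -1 ∨ dr = 0 ∨ dr = 1) (hdc : dc = -1 ∨ dc = 0 ∨ dc = 1)
    (hne : ¬(dr = 0 ∧ dc = 0))
    (hr : 0 ≤ r0 ∧ r0 < gwR grid) (hc : 0 ≤ c0 ∧ c0 < gwC grid)
    (k : Nat) (hk : (k:Int) ≤ gwL (gwR grid) (gwC grid) r0 c0 dr dc) :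
    PySem.Chars.lower (gwWord grid r0 c0 dr dc k) =
      PySem.List.slice (gwaRay (gwaLow grid (gwC grid)) r0 c0 dr dc
        (gwL (gwR grid) (gwC grid) r0 c0 dr dc)) none (some (k:Int)) := by
  have hb := gw_bounds grid r0 c0 dr dc hdr hdc hne hr hc
  have hL1 : 1 ≤ gwL (gwR grid) (gwC grid) r0 c0 dr dc := hb.1.1
  have hlow : ∀ w : List Char, PySem.Chars.lower w = w.map PySem.Chars.lowerChar := fun _ => rfl
  rw [PySem.List.slice_to _ (by omega : (0:Int) ≤ (k:Int)), hlow]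
  apply List.ext_getElem
  · simp [gwWord, gwaRay, PySem.List.length_pyRange_one]
    omega
  · intro i h1 h2
    have hik : i < k := by
      simpa [gwWord] using h1
    have hiL : (i:Int) < gwL (gwR grid) (gwC grid) r0 c0 dr dc := by omega
    have hnb : ¬(r0 + (i:Int)*dr < 0 ∨ gwR grid ≤ r0 + (i:Int)*dr ∨
        c0 + (i:Int)*dc < 0 ∨ gwC grid ≤ c0 + (i:Int)*dc) := by
      intro hbk
      exact absurd ((hb.2 (i:Int) (by omega)).mp hbk) (by omega)
    push Not at hnb
    simp only [gwWord, gwaRay, List.getElem_map, List.getElem_take, List.getElem_range,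
      PySem.List.getElem_pyRange_one, zero_add]
    exact (gw_char_eq grid hpre (r0 + (i:Int)*dr) (c0 + (i:Int)*dc)
      ⟨hnb.1, hnb.2.1⟩ ⟨hnb.2.2.1, hnb.2.2.2⟩).symm

lemma gw_walk_eq (min_len : Int) (grid : List String)
    (hpre : ∀ s ∈ grid, (PySem.List.pyGetD grid 0 "").toList.length ≤ s.toList.length)
    (r0 c0 dr dc : Int)
    (hdr : dr = -1 ∨ dr = 0 ∨ dr = 1) (hdc : dc = -1 ∨ dc = 0 ∨ dc = 1)
    (hne : ¬(dr = 0 ∧ dc = 0))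
    (hr : 0 ≤ r0 ∧ r0 < gwR grid) (hc : 0 ≤ c0 ∧ c0 < gwC grid) :
    ∀ (fuel j : Nat) (words : PySem.Set String),
      (j:Int) ≤ gwL (gwR grid) (gwC grid) r0 c0 dr dc →
      (gwL (gwR grid) (gwC grid) r0 c0 dr dc).toNat ≤ j + fuel →
      gwWalk min_len grid r0 c0 dr dc fuel (j:Int) (gwWord grid r0 c0 dr dc j) words =
        (PySem.List.pyRange (max min_len ((j:Int)+1)) (gwL (gwR grid) (gwC grid) r0 c0 dr dc + 1) 1).foldl
          (fun words k => PySem.Set.add words (String.ofList (PySem.List.slice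
            (gwaRay (gwaLow grid (gwC grid)) r0 c0 dr dc (gwL (gwR grid) (gwC grid) r0 c0 dr dc)) none (some k)))) words := by
  have hb := gw_bounds grid r0 c0 dr dc hdr hdc hne hr hc
  intro fuel
  induction fuel with
  | zero =>
    intro j words hj hf
    rw [PySem.List.pyRange_one_eq_nil (by omega :
      gwL (gwR grid) (gwC grid) r0 c0 dr dc + 1 ≤ max min_len ((j:Int)+1))]
    simp [gwWalk]
  | succ fuel ih =>
    intro j words hj hf
    by_cases hjL : (j:Int) = gwL (gwR grid) (gwC grid) r0 c0 dr dc
    · simp only [gwWalk]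
      rw [if_pos ((hb.2 (j:Int) (by omega)).mpr (by omega))]
      rw [PySem.List.pyRange_one_eq_nil (by omega :
        gwL (gwR grid) (gwC grid) r0 c0 dr dc + 1 ≤ max min_len ((j:Int)+1))]
      rfl
    · have hjlt : (j:Int) < gwL (gwR grid) (gwC grid) r0 c0 dr dc := lt_of_le_of_ne hj hjL
      simp only [gwWalk]
      rw [if_neg (fun hbk => absurd ((hb.2 (j:Int) (by omega)).mp hbk) (by omega))]
      have hword : gwWord grid r0 c0 dr dc j ++ [gwChar grid (r0 + (j:Int)*dr) (c0 + (j:Int)*dc)] =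
          gwWord grid r0 c0 dr dc (j+1) := by
        unfold gwWord; rw [List.range_succ]; simp
      rw [hword]
      have hlen : (((gwWord grid r0 c0 dr dc (j+1)).length) : Int) = (j:Int) + 1 := by
        unfold gwWord; simp
      rw [hlen]
      have hcast : ((j:Int) + 1) = (((j+1 : Nat)):Int) := by push_cast; ring
      rw [hcast]
      by_cases hml : min_len ≤ (j:Int) + 1
      · rw [if_pos (show min_len ≤ (((j+1:Nat)):Int) by push_cast; omega)]
        rw [ih (j+1) _ (by push_cast; omega) (by omega)]
        rw [gw_word_lower_eq grid hpre r0 c0 dr dc hdr hdc hne hr hc (j+1) (by push_cast; omega)]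
        rw [show max min_len ((((j+1:Nat)):Int)) = (((j+1:Nat)):Int) from by push_cast; omega]
        rw [PySem.List.pyRange_one_cons (show (((j+1:Nat)):Int) < gwL (gwR grid) (gwC grid) r0 c0 dr dc + 1 by push_cast; omega)]
        rw [List.foldl_cons]
        rw [show max min_len ((((j+1:Nat)):Int) + 1) = (((j+1:Nat)):Int) + 1 from by push_cast; omega]
      · rw [if_neg (show ¬ min_len ≤ (((j+1:Nat)):Int) by push_cast; omega)]
        rw [ih (j+1) _ (by push_cast; omega) (by omega)]
        rw [show max min_len ((((j+1:Nat)):Int) + 1) = min_len from by push_cast; omega]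
        rw [show max min_len ((((j+1:Nat)):Int)) = min_len from by push_cast; omega]

lemma gw_dir (min_len : Int) (grid : List String)
    (hpre : ∀ s ∈ grid, (PySem.List.pyGetD grid 0 "").toList.length ≤ s.toList.length)
    (r0 c0 dr dc : Int)
    (hdr : dr = -1 ∨ dr = 0 ∨ dr = 1) (hdc : dc = -1 ∨ dc = 0 ∨ dc = 1)
    (hne : ¬(dr = 0 ∧ dc = 0))
    (hr : 0 ≤ r0 ∧ r0 < gwR grid) (hc : 0 ≤ c0 ∧ c0 < gwC grid)
    (n m : Int)
    (hn : n = if 0 < dr then gwR grid - r0 else if dr < 0 then r0 + 1 else gwC grid)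
    (hm : m = if 0 < dc then gwC grid - c0 else if dc < 0 then c0 + 1 else gwR grid)
    (words : PySem.Set String) :
    gwWalk min_len grid r0 c0 dr dc
        (grid.length + (PySem.List.pyGetD grid 0 "").toList.length + 1) 0 [] words =
      (if min n m < max min_len 1 then words
       else (PySem.List.pyRange (max min_len 1) (min n m + 1) 1).foldl
          (fun words k => PySem.Set.add words (String.ofList (PySem.List.slice
            (gwaRay (gwaLow grid (gwC grid)) r0 c0 dr dc (min n m)) none (some k)))) words) := by
  have hb := gw_bounds grid r0 c0 dr dc hdr hdc hne hr hc
  have hLeq : min n m = gwL (gwR grid) (gwC grid) r0 c0 dr dc := by rw [hn, hm]; rfl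
  have e1 : gwR grid = ((grid.length : Nat) : Int) := rfl
  have e2 : gwC grid = (((PySem.List.pyGetD grid 0 "").toList.length : Nat) : Int) := rfl
  have hfuel : (gwL (gwR grid) (gwC grid) r0 c0 dr dc).toNat ≤
      0 + (grid.length + (PySem.List.pyGetD grid 0 "").toList.length + 1) := by
    have h2 := hb.1.2
    omega
  have hw := gw_walk_eq min_len grid hpre r0 c0 dr dc hdr hdc hne hr hc
    (grid.length + (PySem.List.pyGetD grid 0 "").toList.length + 1) 0 words
    (by have h1 := hb.1.1; push_cast; omega) hfuel
  simp only [Nat.cast_zero, zero_add] at hw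
  have hw0 : gwWord grid r0 c0 dr dc 0 = [] := rfl
  rw [hw0] at hw
  rw [hw, hLeq]
  split_ifs with h
  · rw [PySem.List.pyRange_one_eq_nil (by omega)]
    rfl
  · rfl

lemma gw_cell (min_len : Int) (grid : List String)
    (hpre : ∀ s ∈ grid, (PySem.List.pyGetD grid 0 "").toList.length ≤ s.toList.length)
    (r0 c0 : Int) (hr : 0 ≤ r0 ∧ r0 < gwR grid) (hc : 0 ≤ c0 ∧ c0 < gwC grid)
    (words : PySem.Set String) :
    (PySem.List.pyRange (-1) 2 1).foldl (fun words dr =>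
        (PySem.List.pyRange (-1) 2 1).foldl (fun words dc =>
          if dr ≠ 0 ∨ dc ≠ 0 then
            gwWalk min_len grid r0 c0 dr dc
              (grid.length + (PySem.List.pyGetD grid 0 "").toList.length + 1) 0 [] words
          else words) words) words =
      gwaDirs.foldl (fun words dir =>
        let n := if 0 < dir.1 then gwR grid - r0 else if dir.1 < 0 then r0 + 1 else gwC grid
        let m := if 0 < dir.2 then gwC grid - c0 else if dir.2 < 0 then c0 + 1 else gwR grid
        let L := min n m
        if L < max min_len 1 then words
        else
          let ray := gwaRay (gwaLow grid (gwC grid)) r0 c0 dir.1 dir.2 L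
          (PySem.List.pyRange (max min_len 1) (L+1) 1).foldl (fun words k =>
            PySem.Set.add words (String.ofList (PySem.List.slice ray none (some k)))) words)
        words := by
  rw [show (PySem.List.pyRange (-1) 2 1) = ([-1,0,1] : List Int) from by decide]
  simp only [List.foldl, gwaDirs]
  rw [gw_dir min_len grid hpre r0 c0 (-1) (-1) (by norm_num) (by norm_num) (by norm_num) hr hc (r0+1) (c0+1) (by norm_num) (by norm_num),
      gw_dir min_len grid hpre r0 c0 (-1) 0 (by norm_num) (by norm_num) (by norm_num) hr hc (r0+1) (gwR grid) (by norm_num) (by norm_num),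
      gw_dir min_len grid hpre r0 c0 (-1) 1 (by norm_num) (by norm_num) (by norm_num) hr hc (r0+1) (gwC grid - c0) (by norm_num) (by norm_num),
      gw_dir min_len grid hpre r0 c0 0 (-1) (by norm_num) (by norm_num) (by norm_num) hr hc (gwC grid) (c0+1) (by norm_num) (by norm_num),
      gw_dir min_len grid hpre r0 c0 0 1 (by norm_num) (by norm_num) (by norm_num) hr hc (gwC grid) (gwC grid - c0) (by norm_num) (by norm_num),
      gw_dir min_len grid hpre r0 c0 1 (-1) (by norm_num) (by norm_num) (by norm_num) hr hc (gwR grid - r0) (c0+1) (by norm_num) (by norm_num),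
      gw_dir min_len grid hpre r0 c0 1 0 (by norm_num) (by norm_num) (by norm_num) hr hc (gwR grid - r0) (gwR grid) (by norm_num) (by norm_num),
      gw_dir min_len grid hpre r0 c0 1 1 (by norm_num) (by norm_num) (by norm_num) hr hc (gwR grid - r0) (gwC grid - c0) (by norm_num) (by norm_num)]
  rfl

-- ===== VERDICT (by name: the statement is the Claim_ definition above) =====
theorem grid_words_spec : Claim_equal_grid_words := by
  intro min_len grid _hdom hpre
  unfold Spec_grid_words grid_words grid_words_alt
  dsimp only
  by_cases hg : grid.length = 0
  · rw [if_pos (by exact_mod_cast hg)]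
    rw [show ((grid.length:Int)) = 0 from by exact_mod_cast hg]
    rw [PySem.List.pyRange_one_eq_nil (le_refl (0:Int))]
    rfl
  · rw [if_neg (by exact_mod_cast hg)]
    apply PySem.List.foldl_congr_mem
    intro acc r0 hr0
    rw [PySem.List.mem_pyRange_one] at hr0
    apply PySem.List.foldl_congr_mem
    intro acc2 c0 hc0
    rw [PySem.List.mem_pyRange_one] at hc0
    exact gw_cell min_len grid hpre r0 c0 ⟨hr0.1, hr0.2⟩ ⟨hc0.1, hc0.2⟩ acc2
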